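-- pv_equiv track=rewrite | github.com/Ronnildo/Grafos | functions/is_multigraph/is_multigraph.py | is_multigraph
-- ===== SOURCE A (Python) =====
-- def is_multigraph(edges):
--         # Criar um dicionário para armazenar as arestas
--         edge_dict = {}
--
--         for edge in edges:
--             edge_tuple = tuple(sorted(edge))
--             if edge_tuple in edge_dict:
--                 edge_dict[edge_tuple] += 1
--             else:
--                 edge_dict[edge_tuple] = 1
--
--         for i in edge_dict.values():
--             if i > 1:
--                 return True
--         return False
-- ===== SOURCE B (Python) =====
-- def is_multigraph(edges):
--     keys = [tuple(sorted(edge)) for edge in edges]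
--     for i, k in enumerate(keys):
--         if k in keys[i + 1:]:
--             return True
--     return False
-- ===== Notes on version B (the rewrite author's own statement) =====
-- stated objective: alternative
-- what changed: Dropped the count dict entirely: B builds the list of normalized keys and does a direct pairwise comparison, checking each key for membership in the remaining suffix and returning True on the first repeat, instead of A's hash-count pass followed by a scan of the counts.
import Mathlib
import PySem

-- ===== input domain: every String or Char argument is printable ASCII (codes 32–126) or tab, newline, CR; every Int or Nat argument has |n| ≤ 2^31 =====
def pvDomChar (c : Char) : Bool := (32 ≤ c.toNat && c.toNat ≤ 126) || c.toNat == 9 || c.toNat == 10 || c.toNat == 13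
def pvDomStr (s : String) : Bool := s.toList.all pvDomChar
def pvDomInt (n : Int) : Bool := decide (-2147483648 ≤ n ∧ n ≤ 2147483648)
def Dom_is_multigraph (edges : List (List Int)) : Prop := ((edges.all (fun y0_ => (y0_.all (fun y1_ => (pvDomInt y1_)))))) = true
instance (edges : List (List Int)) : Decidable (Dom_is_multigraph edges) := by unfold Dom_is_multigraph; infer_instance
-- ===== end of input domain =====

-- B drops A's count dict entirely: it maps each edge to its normalized key and does a direct
-- pairwise comparison (each key against the remaining suffix, early exit on the first repeat).

-- ===== PORT A =====
def is_multigraph (edges : List (List Int)) : Bool :=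
  -- edge_dict = {}; for edge in edges: count per tuple(sorted(edge))
  let edge_dict : PySem.Dict (List Int) Int :=
    edges.foldl (fun d edge =>
      let edge_tuple := PySem.List.sorted edge (fun x => x) false
      if d.contains edge_tuple then d.insert edge_tuple (d.getD edge_tuple 0 + 1)
      else d.insert edge_tuple 1) PySem.Dict.empty
  -- for i in edge_dict.values(): if i > 1: return True; return False
  edge_dict.values.any (fun i => decide (1 < i))

-- ===== PORT B =====
-- the loop 'for i, k in enumerate(keys): if k in keys[i+1:]: return True' as structural
-- recursion: each key is tested for membership in the suffix after it
def pvSuffixScan : List (List Int) → Bool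
  | [] => false
  | k :: rest => if k ∈ rest then true else pvSuffixScan rest

def is_multigraph_alt (edges : List (List Int)) : Bool :=
  pvSuffixScan (edges.map (fun edge => PySem.List.sorted edge (fun x => x) false))

-- ===== PRECONDITION & SPEC =====
def Spec_is_multigraph (edges : List (List Int)) (out : Bool) : Prop := out = is_multigraph_alt edges
instance (edges : List (List Int)) (out : Bool) : Decidable (Spec_is_multigraph edges out) := by unfold Spec_is_multigraph; infer_instance

-- ===== CLAIM (what is proved, stated in full; the proofs are below) =====
def Claim_equal_is_multigraph : Prop := ∀ (edges : List (List Int)), Dom_is_multigraph edges → Spec_is_multigraph edges (is_multigraph edges)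

-- ===== LEMMAS AND PROOFS =====

-- the normalization key both programs use
def pvKey (e : List Int) : List Int := PySem.List.sorted e (fun x => x) false

-- A's counting loop is the Counter of the normalized edges
theorem pvA_fold_eq_counter (edges : List (List Int)) :
    edges.foldl (fun d edge =>
      let edge_tuple := PySem.List.sorted edge (fun x => x) false
      if d.contains edge_tuple then d.insert edge_tuple (d.getD edge_tuple 0 + 1)
      else d.insert edge_tuple 1) PySem.Dict.empty
      = PySem.Dict.counter (edges.map pvKey) := by
  rw [← PySem.Dict.foldl_insert_getD_add_one_eq_counter, List.foldl_map]
  apply PySem.List.foldl_congr_mem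
  intro d e _
  by_cases h : d.contains (PySem.List.sorted e (fun x => x) false) = true
  · simp [pvKey, h]
  · rw [Bool.not_eq_true] at h
    simp [pvKey, PySem.Dict.getD_of_not_contains, h]

theorem pv_values_counter (xs : List (List Int)) :
    (PySem.Dict.counter xs).values
      = (PySem.Set.ofList xs).map (fun k => (xs.count k : Int)) := by
  have h : (PySem.Dict.counter xs).values = (PySem.Dict.counter xs).items.map Prod.snd := by
    simp [PySem.Dict.values]
  rw [h, PySem.Dict.items_counter, List.map_map]
  rfl

-- A is "some normalized edge occurs more than once"
theorem pvA_char (edges : List (List Int)) :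
    is_multigraph edges = decide (¬ (edges.map pvKey).Nodup) := by
  unfold is_multigraph
  rw [pvA_fold_eq_counter]
  show ((PySem.Dict.counter (edges.map pvKey)).values.any fun i => decide (1 < i)) = _
  rw [pv_values_counter]
  rw [Bool.eq_iff_iff]
  simp only [List.any_eq_true, List.mem_map, decide_eq_true_eq]
  constructor
  · rintro ⟨v, ⟨k, hk, rfl⟩, h1⟩ hnd
    rw [List.nodup_iff_count_le_one] at hnd
    have := hnd k
    omega
  · intro h
    rw [List.nodup_iff_count_le_one] at h
    push Not at h
    obtain ⟨k, hk⟩ := h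
    refine ⟨((edges.map pvKey).count k : Int), ⟨k, ?_, rfl⟩, by exact_mod_cast hk⟩
    rw [PySem.Set.mem_ofList]
    exact List.count_pos_iff.mp (by omega)

-- B's suffix scan detects exactly the failure of Nodup
theorem pvSuffixScan_char (l : List (List Int)) :
    pvSuffixScan l = decide (¬ l.Nodup) := by
  induction l with
  | nil => simp [pvSuffixScan]
  | cons k rest ih =>
    rw [pvSuffixScan]
    by_cases h : k ∈ rest
    · simp [h, List.nodup_cons]
    · simp [h, List.nodup_cons, ih]

theorem pvB_char (edges : List (List Int)) :
    is_multigraph_alt edges = decide (¬ (edges.map pvKey).Nodup) := by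
  unfold is_multigraph_alt
  rw [pvSuffixScan_char]
  rfl

-- ===== VERDICT (by name: the statement is the Claim_ definition above) =====
theorem is_multigraph_spec : Claim_equal_is_multigraph := by
  intro edges _
  unfold Spec_is_multigraph
  rw [pvA_char, pvB_char]
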